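-- pv_equiv track=rewrite | github.com/jrached/6.009 | lab6/lab.py | generate_rule3
-- ===== SOURCE A (Python) =====
-- def find_combinations(students, capacity, result=None):
--    """
--    Takes in a list of (student_room names, False) tuples and returns a list containing
--    all combinations of the former list of students for the capacity of the room.
--    """
--
--    if result == None:
--        result = []
--
--    if len(result) == capacity:
--        return [result]
--
--    combinations = []
--    for index, student in enumerate(students):
--        new_result = result.copy()
--        new_result.append(student)
--        combinations += find_combinations(students[index+1:], capacity, new_result)
--
--    return combinations
--
-- def create_name(student_name, room_name):
--     """  Takes in a student name and a room name returns a student_room name.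
--     """
--     return str(student_name) + "_" + str(room_name)
--
-- def generate_rule3(preferences_map, capacities_map):
--     """ Takes in student preferences and room capacities to return a formula
--         meeting the 'no room has more students than the allowed capacity' constraint.
--     """
--
--     formula = []
--     for room in capacities_map.keys():
--         students = []
--         for student in preferences_map.keys():
--             students.append((create_name(student, room), False))
--         if capacities_map[room] < len(preferences_map):
--             for i in range(capacities_map[room] + 1, len(preferences_map) + 1):
--                formula += find_combinations(students, i)
--     return formula
-- ===== SOURCE B (Python) =====
-- def _bump(x, prev, rest):
--     """Given prev = dp[j-1] and rest = dp[j:], return the updated dp[j:] after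
--     prepending element x to the suffix (dp[j] becomes [x]+each of dp[j-1], then old dp[j])."""
--     if not rest:
--         return []
--     return [[[x] + c for c in prev] + rest[0]] + _bump(x, rest[0], rest[1:])
--
--
-- def generate_rule3(preferences_map, capacities_map):
--     """Suffix dynamic programming: dp[j] holds every size-j combination (in
--     index-lexicographic order) of the suffix of students processed so far."""
--     n = len(preferences_map)
--     formula = []
--     for room, capacity in capacities_map.items():
--         students = [(student + "_" + room, False) for student in preferences_map]
--         dp = [[[]]] + [[] for _ in range(n)]
--         for x in reversed(students):
--             dp = [dp[0]] + _bump(x, dp[0], dp[1:])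
--         for i in range(max(capacity + 1, 0), n + 1):
--             formula += dp[i]
--     return formula
-- ===== Notes on version B (the rewrite author's own statement) =====
-- stated objective: alternative
-- what changed: A enumerates each oversized subset size separately by an accumulator-threading recursion that re-slices the student list and copies the partial result at every node; B runs one suffix dynamic program per room (dp[j] = size-j combinations of the suffix processed so far) computing the combination lists of all sizes in a single backward pass, then concatenates dp[capacity+1..n].
import Mathlib
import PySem

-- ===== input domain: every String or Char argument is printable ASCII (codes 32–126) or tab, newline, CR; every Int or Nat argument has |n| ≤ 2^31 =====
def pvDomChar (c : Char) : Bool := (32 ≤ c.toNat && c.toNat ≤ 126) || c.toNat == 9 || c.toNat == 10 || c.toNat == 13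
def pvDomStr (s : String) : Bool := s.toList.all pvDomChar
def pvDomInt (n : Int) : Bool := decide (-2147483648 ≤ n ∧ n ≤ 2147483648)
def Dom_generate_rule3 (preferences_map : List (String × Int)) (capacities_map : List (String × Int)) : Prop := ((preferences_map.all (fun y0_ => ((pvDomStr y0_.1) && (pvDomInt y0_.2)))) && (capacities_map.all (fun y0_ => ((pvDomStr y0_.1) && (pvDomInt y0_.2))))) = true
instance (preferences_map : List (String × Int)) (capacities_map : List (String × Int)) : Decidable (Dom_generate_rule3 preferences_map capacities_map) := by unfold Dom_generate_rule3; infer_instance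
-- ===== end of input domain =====

-- B replaces A's accumulator-threading subset recursion (which re-slices the student list and
-- copies the partial result at every node) with one suffix dynamic program per room that
-- computes the combination lists of every size in a single backward pass.

-- ===== PORT A =====
def create_name (student_name room_name : String) : String :=
  student_name ++ "_" ++ room_name   -- str() on a str is the identity

-- find_combinations: the 'for index, student in enumerate(students)' loop with the slice
-- students[index+1:] walks the successive tails of students; findAux is that loop, one
-- recursive step per iteration, concatenating the recursive results in the same order
-- (the initial call has result = [], Python's 'result=None' default).
mutual
def findComb (students : List (String × Bool)) (capacity : Int) (result : List (String × Bool)) : List (List (String × Bool)) :=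
  if (result.length : Int) = capacity then [result]
  else findAux students capacity result
termination_by (students.length, 1)
def findAux (students : List (String × Bool)) (capacity : Int) (result : List (String × Bool)) : List (List (String × Bool)) :=
  match students with
  | [] => []
  | s :: rest => findComb rest capacity (result ++ [s]) ++ findAux rest capacity result
termination_by (students.length, 0)
end

def generate_rule3 (preferences_map : List (String × Int)) (capacities_map : List (String × Int)) : List (List (String × Bool)) :=
  let prefs := PySem.Dict.ofList preferences_map
  let caps := PySem.Dict.ofList capacities_map
  caps.keys.foldl (fun formula room =>
    let students := prefs.keys.foldl (fun acc student => acc ++ [(create_name student room, false)]) []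
    -- capacities_map[room]: room comes from caps.keys, so the key is present and getD is that lookup
    if caps.getD room 0 < (prefs.size : Int) then
      (PySem.List.pyRange (caps.getD room 0 + 1) ((prefs.size : Int) + 1)).foldl
        (fun f i => f ++ findComb students i []) formula
    else formula) []

-- ===== PORT B =====
-- _bump: one recursive step per remaining dp entry
def bump (x : String × Bool) : List (List (String × Bool)) → List (List (List (String × Bool))) → List (List (List (String × Bool)))
  | _, [] => []
  | prev, cur :: rest => (prev.map (fun c => x :: c) ++ cur) :: bump x cur rest


def generate_rule3_alt (preferences_map : List (String × Int)) (capacities_map : List (String × Int)) : List (List (String × Bool)) :=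
  let prefs := PySem.Dict.ofList preferences_map
  let n := prefs.size
  (PySem.Dict.ofList capacities_map).items.foldl (fun formula rc =>
    let students := prefs.keys.map (fun student => (student ++ "_" ++ rc.1, false))
    -- 'for x in reversed(students): dp = [dp[0]] + _bump(x, dp[0], dp[1:])'
    -- (dp[0] via pyGetD, total since dp is never empty; the slice dp[1:] is .drop 1)
    let dp := students.reverse.foldl
      (fun dp x => PySem.List.pyGetD dp 0 [] :: bump x (PySem.List.pyGetD dp 0 []) (dp.drop 1))
      ([[]] :: List.replicate n [])
    (PySem.List.pyRange (max (rc.2 + 1) 0) ((n : Int) + 1)).foldl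
      (fun f i => f ++ PySem.List.pyGetD dp i []) formula) []

-- ===== PRECONDITION & SPEC =====
def Spec_generate_rule3 (preferences_map : List (String × Int)) (capacities_map : List (String × Int)) (out : List (List (String × Bool))) : Prop := out = generate_rule3_alt preferences_map capacities_map
instance (preferences_map : List (String × Int)) (capacities_map : List (String × Int)) (out : List (List (String × Bool))) : Decidable (Spec_generate_rule3 preferences_map capacities_map out) := by unfold Spec_generate_rule3; infer_instance

-- ===== CLAIM (what is proved, stated in full; the proofs are below) =====
def Claim_equal_generate_rule3 : Prop := ∀ (preferences_map : List (String × Int)) (capacities_map : List (String × Int)), Dom_generate_rule3 preferences_map capacities_map → Spec_generate_rule3 preferences_map capacities_map (generate_rule3 preferences_map capacities_map)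

-- ===== LEMMAS AND PROOFS =====

-- combs k l = the size-k combinations of l in index-lexicographic order: the reference
-- object both ports are proved equal to.
def combs : Nat → List (String × Bool) → List (List (String × Bool))
  | 0, _ => [[]]
  | _ + 1, [] => []
  | k + 1, x :: xs => (combs k xs).map (fun c => x :: c) ++ combs (k + 1) xs



theorem findAux_small (students : List (String × Bool)) :
    ∀ (result : List (String × Bool)) (capacity : Int), capacity < (result.length : Int) →
      findAux students capacity result = [] := by
  induction students with
  | nil => intro r c h; rw [findAux]
  | cons s rest ih =>
    intro r c h
    rw [findAux, findComb, if_neg (by simp; omega),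
        ih (r ++ [s]) c (by simp; omega), ih r c h]
    rfl


theorem findAux_spec (students : List (String × Bool)) :
    ∀ (k : Nat) (result : List (String × Bool)),
      findAux students ((result.length + k + 1 : Nat) : Int) result
        = (combs (k + 1) students).map (result ++ ·) := by
  induction students with
  | nil => intro k r; rw [findAux]; simp [combs]
  | cons s rest ih =>
    intro k r
    rw [findAux, findComb, combs]
    cases k with
    | zero =>
      rw [if_pos (by simp)]
      have h2 := ih 0 r
      simp only [combs] at h2 ⊢
      rw [h2]
      simp
    | succ j =>
      rw [if_neg (by simp; omega)]
      have h1 := ih j (r ++ [s])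
      have h2 := ih (j + 1) r
      rw [show r.length + (j + 1) + 1 = (r ++ [s]).length + j + 1 by simp; omega] at h2 ⊢
      rw [h1, h2]
      simp [List.map_map, Function.comp_def]

theorem findComb_combs (students : List (String × Bool)) (k : Nat) :
    findComb students (k : Int) [] = combs k students := by
  rw [findComb]
  cases k with
  | zero => rw [if_pos (by simp)]; simp [combs]
  | succ j =>
    rw [if_neg (by intro hc; simp at hc; omega)]
    have := findAux_spec students j []
    simp only [List.length_nil, Nat.zero_add] at this
    rw [this]
    simp

theorem findComb_neg (students : List (String × Bool)) (capacity : Int) (h : capacity < 0) :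
    findComb students capacity [] = [] := by
  rw [findComb, if_neg (by simp; omega)]
  exact findAux_small students [] capacity (by simpa using h)


theorem bump_spec (m : Nat) : ∀ (j : Nat) (x : String × Bool) (l : List (String × Bool)),
    bump x (combs j l) ((List.range' (j + 1) m).map (fun k => combs k l))
      = (List.range' (j + 1) m).map (fun k => combs k (x :: l)) := by
  induction m with
  | zero => intro j x l; rfl
  | succ m ih =>
    intro j x l
    rw [List.range'_succ, List.map_cons, List.map_cons, bump]
    rw [show j + 1 + 1 = (j + 1) + 1 from rfl, ih (j + 1) x l]
    simp [combs]


theorem range_map_combs (n : Nat) (ys : List (String × Bool)) :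
    (List.range (n + 1)).map (fun k => combs k ys)
      = combs 0 ys :: (List.range' 1 n).map (fun k => combs k ys) := by
  rw [List.range_succ_eq_map, List.map_cons, List.map_map, List.range'_eq_map_range, List.map_map]
  simp [Function.comp_def, Nat.add_comm]

theorem dp_inv (n : Nat) (l : List (String × Bool)) :
    l.reverse.foldl
      (fun dp x => PySem.List.pyGetD dp 0 [] :: bump x (PySem.List.pyGetD dp 0 []) (dp.drop 1))
      ([[]] :: List.replicate n [])
    = (List.range (n + 1)).map (fun k => combs k l) := by
  rw [List.foldl_reverse]
  induction l with
  | nil =>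
    rw [List.foldr_nil, range_map_combs]
    rw [List.range'_eq_map_range, List.map_map]
    have h : ∀ k : Nat, combs (1 + k) ([] : List (String × Bool)) = [] := by
      intro k; rw [Nat.add_comm]; rfl
    simp [combs, Function.comp_def, h]
  | cons x xs ih =>
    rw [List.foldr_cons, ih, range_map_combs n xs, PySem.List.pyGetD_zero_cons, List.drop_one,
        List.tail_cons]
    have hb := bump_spec n 0 x xs
    norm_num at hb
    rw [hb, range_map_combs n (x :: xs)]
    simp [combs]

theorem foldl_skip_neg (students : List (String × Bool)) (l : List Int)
    (h : ∀ i ∈ l, i < 0) : ∀ (acc : List (List (String × Bool))),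
    l.foldl (fun f i => f ++ findComb students i []) acc = acc := by
  induction l with
  | nil => intro acc; rfl
  | cons a t ih =>
    intro acc
    rw [List.foldl_cons, findComb_neg students a (h a (by simp)), List.append_nil]
    exact ih (fun i hi => h i (by simp [hi])) acc

theorem getD_combs (students : List (String × Bool)) (n : Nat) (i : Int)
    (h0 : 0 ≤ i) (h1 : i < (n : Int) + 1) :
    PySem.List.pyGetD ((List.range (n + 1)).map (fun k => combs k students)) i []
      = combs i.toNat students := by
  rw [show i = ((i.toNat : Nat) : Int) by omega, PySem.List.pyGetD_natCast]
  rw [List.getD_eq_getElem?_getD, List.getElem?_map,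
      List.getElem?_range (by omega : i.toNat < n + 1)]
  rfl

theorem inner_eq (students : List (String × Bool)) (n : Nat) (hn : students.length = n)
    (cap : Int) (formula : List (List (String × Bool))) :
    (if cap < (n : Int) then
      (PySem.List.pyRange (cap + 1) ((n : Int) + 1)).foldl
        (fun f i => f ++ findComb students i []) formula
     else formula)
    = (PySem.List.pyRange (max (cap + 1) 0) ((n : Int) + 1)).foldl
        (fun f i => f ++ PySem.List.pyGetD ((List.range (n + 1)).map (fun k => combs k students)) i []) formula := by
  have hcongr : ∀ (a : Int) (ha : 0 ≤ a) (acc : List (List (String × Bool))),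
      (PySem.List.pyRange a ((n : Int) + 1)).foldl
        (fun f i => f ++ findComb students i []) acc
      = (PySem.List.pyRange a ((n : Int) + 1)).foldl
        (fun f i => f ++ PySem.List.pyGetD ((List.range (n + 1)).map (fun k => combs k students)) i []) acc := by
    intro a ha acc
    apply PySem.List.foldl_congr_mem
    intro acc' i hi
    rw [PySem.List.mem_pyRange_one] at hi
    have h0 : 0 ≤ i := le_trans ha hi.1
    rw [getD_combs students n i h0 hi.2,
        show i = ((i.toNat : Nat) : Int) by omega, findComb_combs]
    simp
    congr 1
    omega
  by_cases hcap : cap < (n : Int)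
  · rw [if_pos hcap]
    by_cases hneg : 0 ≤ cap + 1
    · rw [show max (cap + 1) 0 = cap + 1 by omega]
      exact hcongr (cap + 1) hneg formula
    · rw [show max (cap + 1) 0 = 0 by omega]
      rw [PySem.List.pyRange_one_append (cap + 1) 0 ((n : Int) + 1) (by omega) (by omega),
          List.foldl_append,
          foldl_skip_neg students _ (fun i hi => by
            rw [PySem.List.mem_pyRange_one] at hi; omega) formula]
      exact hcongr 0 le_rfl formula
  · rw [if_neg hcap]
    rw [show max (cap + 1) 0 = cap + 1 by omega]
    rw [PySem.List.pyRange_one_eq_nil (by omega)]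
    rfl


theorem main_eq (preferences_map capacities_map : List (String × Int)) :
    generate_rule3 preferences_map capacities_map = generate_rule3_alt preferences_map capacities_map := by
  unfold generate_rule3 generate_rule3_alt
  simp only [PySem.Dict.keys, List.foldl_map]
  apply PySem.List.foldl_congr_mem
  intro formula rc hrc
  obtain ⟨room, cap⟩ := rc
  rw [PySem.List.foldl_append_singleton_eq_map, List.nil_append]
  rw [PySem.Dict.getD_of_mem_items _ hrc (PySem.Dict.nodup_keys_ofList _) 0]
  rw [dp_inv]
  simp only [create_name, List.map_map, Function.comp_def]
  exact inner_eq _ _ (by simp [PySem.Dict.size]) cap formula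

-- ===== VERDICT (by name: the statement is the Claim_ definition above) =====
theorem generate_rule3_spec : Claim_equal_generate_rule3 := by
  intro preferences_map capacities_map _
  unfold Spec_generate_rule3
  exact main_eq preferences_map capacities_map
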